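-- pv_equiv track=rewrite | github.com/jcrickmer/scythe_solver | util.py | bounded_allocations
-- ===== SOURCE A (Python) =====
-- from typing import List, Tuple
--
-- def bounded_allocations(bounds: List[int], total: int) -> List[Tuple[int, ...]]:
--     """
--     Return all tuples a where:
--       - len(a) == len(bounds)
--       - 0 <= a[i] <= bounds[i]
--       - sum(a) == total
--
--     Example:
--       bounds=[3,2], total=2 -> [(0,2),(1,1),(2,0)]
--     """
--     result: List[Tuple[int, ...]] = []
--
--     def rec(i: int, remaining: int, acc: List[int]) -> None:
--         if i == len(bounds):
--             if remaining == 0: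
--                 result.append(tuple(acc))
--             return
--
--         max_take = min(bounds[i], remaining)
--         for take in range(0, max_take + 1):
--             acc.append(take)
--             rec(i + 1, remaining - take, acc)
--             acc.pop()
--
--     rec(0, total, [])
--     return result
-- ===== SOURCE B (Python) =====
-- from typing import List, Tuple
--
-- def bounded_allocations(bounds: List[int], total: int) -> List[Tuple[int, ...]]:
--     # suffixes[i] = sum(bounds[i:]); lets each level skip takes that cannot
--     # possibly be completed by the remaining positions (suffix-sum pruning).
--     suffixes = [0]
--     for b in reversed(bounds):
--         suffixes.append(suffixes[-1] + b)
--     suffixes.reverse()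
--
--     def go(i: int, remaining: int) -> List[Tuple[int, ...]]:
--         if i == len(bounds):
--             return [()] if remaining == 0 else []
--         lo = remaining - suffixes[i + 1]
--         if lo < 0:
--             lo = 0
--         hi = min(bounds[i], remaining)
--         return [(t,) + rest
--                 for t in range(lo, hi + 1)
--                 for rest in go(i + 1, remaining - t)]
--
--     return go(0, total)
-- ===== Notes on version B (the rewrite author's own statement) =====
-- stated objective: alternative
-- what changed: B precomputes suffix sums of the bounds and at each level starts the take-loop at max(0, remaining - suffix_sum), skipping takes that cannot be completed, and builds the result functionally (nested comprehension) instead of A's shared acc/result accumulators with append/pop; A tries every take from 0 up and only detects failure at the leaves.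
import Mathlib
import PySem

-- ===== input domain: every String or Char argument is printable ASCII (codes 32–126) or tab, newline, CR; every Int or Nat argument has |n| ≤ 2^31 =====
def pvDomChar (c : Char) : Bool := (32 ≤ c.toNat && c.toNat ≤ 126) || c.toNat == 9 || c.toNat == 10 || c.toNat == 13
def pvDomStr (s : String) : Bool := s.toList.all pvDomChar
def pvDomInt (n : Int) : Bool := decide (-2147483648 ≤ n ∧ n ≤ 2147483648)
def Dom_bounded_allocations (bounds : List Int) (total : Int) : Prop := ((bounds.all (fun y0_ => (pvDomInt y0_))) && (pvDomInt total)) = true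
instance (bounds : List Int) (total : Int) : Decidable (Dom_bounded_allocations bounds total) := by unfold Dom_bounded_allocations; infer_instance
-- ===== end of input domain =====

-- B enumerates with suffix-sum pruning (each level only tries takes that the remaining bounds can
-- still complete) and builds the result functionally instead of via shared accumulators.


-- ===== PORT A =====
-- Python's rec(i, remaining, acc) reads bounds[i] and recurses to i+1; it is ported as
-- structural recursion on the suffix bounds[i:], carrying the same acc and result accumulator.
def pvRecA : List Int → Int → List Int → List (List Int) → List (List Int)
  | [], remaining, acc, result => if remaining = 0 then result ++ [acc] else result
  | b :: rest, remaining, acc, result =>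
      let maxTake := min b remaining
      (PySem.List.pyRange 0 (maxTake + 1) 1).foldl
        (fun res take => pvRecA rest (remaining - take) (acc ++ [take]) res) result

def bounded_allocations (bounds : List Int) (total : Int) : List (List Int) :=
  pvRecA bounds total [] []

-- ===== PORT B =====
-- Python builds suffixes by appending to [0] over reversed(bounds) then reversing;
-- the cons-fold over bounds.reverse produces the identical list.
def pvSuffixes (bounds : List Int) : List Int :=
  bounds.reverse.foldl (fun acc b => (acc.headD 0 + b) :: acc) [0]

-- Python's go(i, remaining) reads suffixes[i+1]; ported by passing the suffix list from index i+1
-- on (st) in lockstep with the structural recursion on bounds[i:].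
def pvGoB : List Int → List Int → Int → List (List Int)
  | [], _, remaining => if remaining = 0 then [[]] else []
  | b :: rest, st, remaining =>
      let lo0 := remaining - st.headD 0
      let lo := if lo0 < 0 then 0 else lo0
      let hi := min b remaining
      (PySem.List.pyRange lo (hi + 1) 1).flatMap
        (fun t => (pvGoB rest st.tail (remaining - t)).map (fun r => t :: r))

def bounded_allocations_alt (bounds : List Int) (total : Int) : List (List Int) :=
  pvGoB bounds (pvSuffixes bounds).tail total

-- ===== PRECONDITION & SPEC =====
def Spec_bounded_allocations (bounds : List Int) (total : Int) (out : List (List Int)) : Prop := out = bounded_allocations_alt bounds total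
instance (bounds : List Int) (total : Int) (out : List (List Int)) : Decidable (Spec_bounded_allocations bounds total out) := by unfold Spec_bounded_allocations; infer_instance

-- ===== CLAIM (what is proved, stated in full; the proofs are below) =====
def Claim_equal_bounded_allocations : Prop := ∀ (bounds : List Int) (total : Int), Dom_bounded_allocations bounds total → Spec_bounded_allocations bounds total (bounded_allocations bounds total)

-- ===== LEMMAS AND PROOFS =====

theorem pvSuffixes_cons (b : Int) (rest : List Int) :
    pvSuffixes (b :: rest) = ((pvSuffixes rest).headD 0 + b) :: pvSuffixes rest := by
  simp [pvSuffixes, List.foldl_append]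

theorem pvSuffixes_headD (l : List Int) : (pvSuffixes l).headD 0 = l.sum := by
  induction l with
  | nil => simp [pvSuffixes]
  | cons b rest ih =>
      rw [pvSuffixes_cons]
      simp only [List.headD_cons, ih, List.sum_cons]
      ring

-- pruning soundness: when more is demanded than the remaining bounds can supply, B's
-- recursion (for ANY suffix argument) returns nothing
theorem pvGoB_nil_of_sum_lt (l : List Int) (s : List Int) (r : Int) (h : l.sum < r) :
    pvGoB l s r = [] := by
  induction l generalizing s r with
  | nil => simp at h; simp [pvGoB]; omega
  | cons b rest ih =>
      simp only [pvGoB]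
      rw [List.flatMap_eq_nil_iff]
      intro t ht
      rw [PySem.List.mem_pyRange_one] at ht
      have hsum : rest.sum < r - t := by
        have hb : t ≤ min b r := by omega
        simp at h ⊢
        omega
      rw [ih _ _ hsum]
      simp

theorem pvMain (bounds : List Int) (r : Int) (acc : List Int) (res : List (List Int)) :
    pvRecA bounds r acc res
      = res ++ (pvGoB bounds (pvSuffixes bounds).tail r).map (fun xs => acc ++ xs) := by
  induction bounds generalizing r acc res with
  | nil =>
      simp only [pvRecA, pvGoB]
      split <;> simp
  | cons b rest ih =>
      simp only [pvRecA]
      -- rewrite the loop body with the induction hypothesis, then fold -> flatMap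
      have hfun : (fun (res : List (List Int)) (take : Int) =>
            pvRecA rest (r - take) (acc ++ [take]) res)
          = fun res t => res ++ (pvGoB rest (pvSuffixes rest).tail (r - t)).map
                                  (fun xs => acc ++ (t :: xs)) := by
        funext res t
        rw [ih]
        simp
      rw [hfun, PySem.List.foldl_append_eq_flatMap]
      -- unfold B one step
      have hst : (pvSuffixes (b :: rest)).tail = pvSuffixes rest := by
        rw [pvSuffixes_cons, List.tail_cons]
      rw [hst]
      simp only [pvGoB, pvSuffixes_headD]
      rw [List.map_flatMap]
      simp only [List.map_map, Function.comp_def]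
      set lo0 := r - rest.sum with hlo0
      set lo := if lo0 < 0 then 0 else lo0 with hlo
      have hlo_nonneg : 0 ≤ lo := by rw [hlo]; split <;> omega
      have hprune : ∀ t : Int, 0 ≤ t → t < lo →
          (pvGoB rest (pvSuffixes rest).tail (r - t)).map (fun xs => acc ++ t :: xs) = [] := by
        intro t _ htlo
        have hsum : rest.sum < r - t := by
          have heq : lo = lo0 := by rw [hlo]; split <;> omega
          omega
        rw [pvGoB_nil_of_sum_lt _ _ _ hsum]
        simp
      congr 1
      by_cases hcase : lo ≤ min b r + 1
      · rw [PySem.List.pyRange_one_append 0 lo (min b r + 1) hlo_nonneg hcase,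
            List.flatMap_append]
        have hnil : (PySem.List.pyRange 0 lo 1).flatMap
            (fun t => (pvGoB rest (pvSuffixes rest).tail (r - t)).map
                        (fun xs => acc ++ t :: xs)) = [] := by
          rw [List.flatMap_eq_nil_iff]
          intro t ht
          rw [PySem.List.mem_pyRange_one] at ht
          exact hprune t ht.1 ht.2
        rw [hnil, List.nil_append]
      · rw [PySem.List.pyRange_one_eq_nil (by omega : min b r + 1 ≤ lo)]
        simp only [List.flatMap_nil]
        rw [List.flatMap_eq_nil_iff]
        intro t ht
        rw [PySem.List.mem_pyRange_one] at ht
        exact hprune t ht.1 (by omega)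

-- ===== VERDICT (by name: the statement is the Claim_ definition above) =====
theorem bounded_allocations_spec : Claim_equal_bounded_allocations := by
  intro bounds total _
  unfold Spec_bounded_allocations bounded_allocations bounded_allocations_alt
  rw [pvMain]
  simp
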